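-- pv_equiv track=rewrite | github.com/tuenguyenprograming1003/Game-8Rocks | Alg/bfs.py | bfs_target
-- ===== SOURCE A (Python) =====
-- from collections import deque
--
-- n = 8
--
-- def bfs_target(tg):
--     tg_t = tuple(tg)
--     start = tuple()
--     q = deque([start])
--     par = {start: None}
--     while q:
--         st = q.popleft()
--         if len(st) == n:
--             if tuple(st) == tg_t:
--                 break
--             else:
--                 continue
--         for c in range(n):
--             if c in st: continue
--             ns = tuple(list(st)+[c])
--             if ns not in par:
--                 par[ns] = st
--                 q.append(ns)
--                 if ns == tg_t:
--                     q.clear()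
--                     break
--     if tg_t not in par: return []
--     path = []
--     cur = tg_t
--     while cur is not None:
--         s = [None]*n
--         for i,v in enumerate(cur): s[i]=v
--         path.append(s)
--         cur = par.get(cur)
--     return path[::-1]
-- ===== SOURCE B (Python) =====
-- def bfs_target(tg):
--     n = 8
--     if len(set(tg)) != len(tg) or any(v < 0 or v >= n for v in tg):
--         return []
--     return [list(tg[:i]) + [None] * (n - i) for i in range(len(tg) + 1)]
-- ===== Notes on version B (the rewrite author's own statement) =====
-- stated objective: faster
-- what changed: Replaces the breadth-first search over all no-repeat prefix tuples of range(8) (with a parent dict and path reconstruction) by a direct validity check (distinct values inside 0..7) followed by emitting the None-padded prefixes of tg in one comprehension.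
import Mathlib
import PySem

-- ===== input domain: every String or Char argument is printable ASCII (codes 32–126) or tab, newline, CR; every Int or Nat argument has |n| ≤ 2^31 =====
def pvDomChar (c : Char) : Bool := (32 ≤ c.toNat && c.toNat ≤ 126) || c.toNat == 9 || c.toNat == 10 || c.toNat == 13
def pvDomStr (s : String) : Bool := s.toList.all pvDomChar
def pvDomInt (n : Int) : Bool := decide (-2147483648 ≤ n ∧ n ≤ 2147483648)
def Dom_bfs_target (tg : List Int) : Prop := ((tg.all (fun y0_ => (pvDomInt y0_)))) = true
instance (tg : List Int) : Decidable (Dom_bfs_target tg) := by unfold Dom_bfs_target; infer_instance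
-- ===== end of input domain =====

-- B replaces A's breadth-first enumeration of all no-repeat prefixes of range(8) by a direct
-- validity check plus emission of the padded prefixes of tg (objective: faster).

-- ===== PORT A =====
-- Python's dict is a hash table: `par` is only ever used for insert / membership / lookup
-- (its iteration order is never observed), so Std.HashMap is an exact port of it here.
-- collections.deque is ported as the standard two-list FIFO queue (push at back, pop at front).

def pvQPush (q : List (List Int) × List (List Int)) (x : List Int) :
    List (List Int) × List (List Int) := (q.1, x :: q.2)

def pvQPop (q : List (List Int) × List (List Int)) :
    Option (List Int × (List (List Int) × List (List Int))) :=
  match q with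
  | (x :: f, b) => some (x, (f, b))
  | ([], b) =>
    match b.reverse with
    | [] => none
    | x :: f => some (x, (f, []))

-- the inner `for c in range(n)` loop of A, with its `break` on finding the target
-- (Python's `q.clear()` is the `([], [])` queue returned on that branch)
def bfsInner (tgt st : List Int) :
    List Int → (List (List Int) × List (List Int)) →
    Std.HashMap (List Int) (Option (List Int)) →
    (List (List Int) × List (List Int)) × Std.HashMap (List Int) (Option (List Int)) × Bool
  | [], q, par => (q, par, false)
  | c :: cs, q, par =>
    if st.contains c then bfsInner tgt st cs q par
    else
      let ns := st ++ [c]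
      if par.contains ns then bfsInner tgt st cs q par
      else
        let par' := par.insert ns (some st)
        let q' := pvQPush q ns
        if ns = tgt then (([], []), par', true)
        else bfsInner tgt st cs q' par'

-- the `while q` loop; the fuel only totalizes the recursion (the proof below shows
-- the queue empties, or the target is found, long before 20000000 iterations)
def bfsLoop (tgt : List Int) :
    Nat → (List (List Int) × List (List Int)) →
    Std.HashMap (List Int) (Option (List Int)) →
    Std.HashMap (List Int) (Option (List Int))
  | 0, _, par => par
  | fuel + 1, q, par =>
    match pvQPop q with
    | none => par
    | some (st, q') =>
      if st.length = 8 then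
        if st = tgt then par else bfsLoop tgt fuel q' par
      else
        match bfsInner tgt st (PySem.List.pyRange 0 8 1) q' par with
        | (q'', par', _) => bfsLoop tgt fuel q'' par'

-- s = [None]*n; for i, v in enumerate(cur): s[i] = v
-- (List.set is exact here: every list this is applied to has length ≤ 8 = n)
def padRow (cur : List Int) : List (Option Int) :=
  (PySem.List.enumerate cur).foldl (fun s iv => s.set iv.1.toNat (some iv.2))
    (List.replicate 8 none)

-- the parent-chain walk `while cur is not None`; par.get(cur) is (par[cur]?).join
-- (fuel tg.length+1 = the chain length: each stored parent is one element shorter)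
def rebuild : Nat → Std.HashMap (List Int) (Option (List Int)) →
    Option (List Int) → List (List (Option Int)) → List (List (Option Int))
  | _, _, none, path => path
  | 0, _, some _, path => path
  | fuel + 1, par, some cur, path => rebuild fuel par (par[cur]?).join (path ++ [padRow cur])

def bfs_target (tg : List Int) : List (List (Option Int)) :=
  let par0 : Std.HashMap (List Int) (Option (List Int)) :=
    Std.HashMap.emptyWithCapacity.insert [] none
  let parF := bfsLoop tg 20000000 ([[]], []) par0
  if parF.contains tg then (rebuild (tg.length + 1) parF (some tg) []).reverse
  else []

-- ===== PORT B =====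
def bfs_target_alt (tg : List Int) : List (List (Option Int)) :=
  if (PySem.Set.ofList tg).length ≠ tg.length
      ∨ tg.any (fun v => decide (v < 0) || decide (8 ≤ v)) = true then []
  else (List.range (tg.length + 1)).map
    (fun i => (tg.take i).map some ++ List.replicate (8 - i) none)

-- ===== PRECONDITION & SPEC =====
def Spec_bfs_target (tg : List Int) (out : List (List (Option Int))) : Prop := out = bfs_target_alt tg
instance (tg : List Int) (out : List (List (Option Int))) : Decidable (Spec_bfs_target tg out) := by unfold Spec_bfs_target; infer_instance

-- ===== CLAIM (what is proved, stated in full; the proofs are below) =====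
def Claim_equal_bfs_target : Prop := ∀ (tg : List Int), Dom_bfs_target tg → Spec_bfs_target tg (bfs_target tg)

-- ===== LEMMAS AND PROOFS =====

-- a word the BFS can reach: distinct values from 0..7
def ValidW (w : List Int) : Prop := w.Nodup ∧ ∀ x ∈ w, 0 ≤ x ∧ x < 8

-- the elements of the two-list queue, front to back
def QL (q : List (List Int) × List (List Int)) : List (List Int) := q.1 ++ q.2.reverse

-- every no-repeat word over 0..7, as a list (only its membership and a length bound are used)
def allWords : List (List Int) := ([0, 1, 2, 3, 4, 5, 6, 7] : List Int).sublists.flatMap List.permutations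

def WFS : Finset (List Int) := allWords.toFinset

def KeysF (par : Std.HashMap (List Int) (Option (List Int))) : Finset (List Int) :=
  par.keys.toFinset

-- the loop measure
def mu (q : List (List Int) × List (List Int))
    (par : Std.HashMap (List Int) (Option (List Int))) : Nat :=
  (WFS \ KeysF par).card + (QL q).length

-- the invariant on par
def InvP (par : Std.HashMap (List Int) (Option (List Int))) : Prop :=
  (∀ k, k ∈ par → ValidW k) ∧
  ([] ∈ par) ∧
  (∀ k, k ∈ par → par[k]? = some (if k = [] then none else some k.dropLast)) ∧
  (∀ k, k ∈ par → k ≠ [] → k.dropLast ∈ par)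

def Expanded (par : Std.HashMap (List Int) (Option (List Int))) (w : List Int) : Prop :=
  ∀ c : Int, 0 ≤ c → c < 8 → c ∉ w → (w ++ [c]) ∈ par

def Comp (tgt : List Int) (q : List (List Int) × List (List Int))
    (par : Std.HashMap (List Int) (Option (List Int))) : Prop :=
  tgt ∈ par ∨ ∀ w, w ∈ par → w.length < 8 → (w ∈ QL q ∨ Expanded par w)

theorem nodup_subset_length (l m : List Int) (h : l.Nodup) (hs : ∀ x ∈ l, x ∈ m) :
    l.length ≤ m.length := by
  have h1 : l.toFinset.card = l.length := List.toFinset_card_of_nodup h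
  have h2 : l.toFinset ⊆ m.toFinset := by
    intro x hx
    simp only [List.mem_toFinset] at hx ⊢
    exact hs x hx
  have h3 := Finset.card_le_card h2
  have h4 : m.toFinset.card ≤ m.length := m.toFinset_card_le
  omega

theorem validW_length_le (w : List Int) (h : ValidW w) : w.length ≤ 8 := by
  obtain ⟨hn, hr⟩ := h
  have h1 : w.toFinset.card = w.length := List.toFinset_card_of_nodup hn
  have h2 : w.toFinset ⊆ Finset.Icc (0 : Int) 7 := by
    intro x hx
    simp only [List.mem_toFinset] at hx
    have := hr x hx
    simp only [Finset.mem_Icc]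
    omega
  have h3 := Finset.card_le_card h2
  rw [h1, Int.card_Icc] at h3
  simpa using h3

theorem mem_L8 (x : Int) (h0 : 0 ≤ x) (h8 : x < 8) :
    x ∈ ([0, 1, 2, 3, 4, 5, 6, 7] : List Int) := by
  simp only [List.mem_cons, List.not_mem_nil, or_false]
  omega

theorem mem_WFS (w : List Int) (h : ValidW w) : w ∈ WFS := by
  obtain ⟨hn, hr⟩ := h
  have hnL8 : ([0, 1, 2, 3, 4, 5, 6, 7] : List Int).Nodup := by decide
  set s := ([0, 1, 2, 3, 4, 5, 6, 7] : List Int).filter (fun x => decide (x ∈ w)) with hs_def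
  have hs : s.Sublist ([0, 1, 2, 3, 4, 5, 6, 7] : List Int) := List.filter_sublist
  have hsn : s.Nodup := hs.nodup hnL8
  have hperm : w.Perm s := by
    apply List.perm_of_nodup_nodup_toFinset_eq hn hsn
    ext x
    simp only [List.mem_toFinset, hs_def, List.mem_filter, decide_eq_true_eq]
    constructor
    · intro hx
      exact ⟨mem_L8 x (hr x hx).1 (hr x hx).2, hx⟩
    · intro hx
      exact hx.2
  have hperm' : w ∈ s.permutations := List.mem_permutations.mpr hperm
  have : w ∈ allWords :=
    List.mem_flatMap.mpr ⟨s, List.mem_sublists.mpr hs, hperm'⟩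
  exact List.mem_toFinset.mpr this

theorem WFS_card_le : WFS.card ≤ 10321920 := by
  have h1 : WFS.card ≤ allWords.length := allWords.toFinset_card_le
  have h2 : allWords.length ≤ 10321920 := by
    unfold allWords
    rw [List.length_flatMap]
    have hb : ∀ x ∈ (([0, 1, 2, 3, 4, 5, 6, 7] : List Int).sublists.map
        (fun s => s.permutations.length)), x ≤ 40320 := by
      intro x hx
      simp only [List.mem_map] at hx
      obtain ⟨s, hs, rfl⟩ := hx
      rw [List.length_permutations]
      have hl : s.length ≤ 8 := by
        have := (List.mem_sublists.mp hs).length_le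
        simpa using this
      calc s.length.factorial ≤ (8 : Nat).factorial := Nat.monotone_factorial hl
        _ = 40320 := by norm_num [Nat.factorial]
    have hsum := List.sum_le_card_nsmul _ 40320 hb
    have hl2 : ((([0, 1, 2, 3, 4, 5, 6, 7] : List Int).sublists.map
        (fun s => s.permutations.length))).length = 256 := by
      simp [List.length_sublists]
    rw [hl2] at hsum
    simpa using hsum
  omega

theorem QL_pop (q : List (List Int) × List (List Int)) (st : List Int)
    (q' : List (List Int) × List (List Int)) (h : pvQPop q = some (st, q')) :
    QL q = st :: QL q' := by
  obtain ⟨f, b⟩ := q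
  cases f with
  | cons x f' =>
    simp only [pvQPop, Option.some.injEq, Prod.mk.injEq] at h
    obtain ⟨rfl, rfl⟩ := h
    simp [QL]
  | nil =>
    rcases hb : b.reverse with _ | ⟨x, f'⟩ <;>
      simp only [pvQPop, hb, Option.some.injEq, Prod.mk.injEq, reduceCtorEq] at h
    obtain ⟨rfl, rfl⟩ := h
    simp [QL, hb]

theorem QL_pop_none (q : List (List Int) × List (List Int)) (h : pvQPop q = none) :
    QL q = [] := by
  obtain ⟨f, b⟩ := q
  cases f with
  | cons x f' => simp [pvQPop] at h
  | nil =>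
    rcases hb : b.reverse with _ | ⟨x, f'⟩ <;> simp only [pvQPop, hb] at h
    · simp [QL, hb]
    · cases h

theorem QL_push (q : List (List Int) × List (List Int)) (x : List Int) :
    QL (pvQPush q x) = QL q ++ [x] := by
  obtain ⟨f, b⟩ := q
  simp [QL, pvQPush]

-- KeysF bookkeeping
theorem mem_KeysF (par : Std.HashMap (List Int) (Option (List Int))) (k : List Int) :
    k ∈ KeysF par ↔ k ∈ par := by
  unfold KeysF
  rw [List.mem_toFinset, Std.HashMap.mem_keys]

theorem KeysF_insert (par : Std.HashMap (List Int) (Option (List Int))) (ns : List Int)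
    (v : Option (List Int)) : KeysF (par.insert ns v) = insert ns (KeysF par) := by
  ext k
  rw [mem_KeysF, Finset.mem_insert, mem_KeysF, Std.HashMap.mem_insert]
  simp only [beq_iff_eq]
  constructor
  · rintro (h | h)
    · exact Or.inl h.symm
    · exact Or.inr h
  · rintro (h | h)
    · exact Or.inl h.symm
    · exact Or.inr h

theorem mu_insert (q : List (List Int) × List (List Int))
    (par : Std.HashMap (List Int) (Option (List Int))) (ns : List Int) (v : Option (List Int))
    (hns : ns ∉ par) (hW : ns ∈ WFS) :
    mu (pvQPush q ns) (par.insert ns v) = mu q par := by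
  unfold mu
  rw [KeysF_insert par ns v, QL_push, List.length_append]
  have hmem : ns ∈ WFS \ KeysF par :=
    Finset.mem_sdiff.mpr ⟨hW, by rw [mem_KeysF]; exact hns⟩
  rw [Finset.sdiff_insert, Finset.card_erase_of_mem hmem]
  have hpos : 1 ≤ (WFS \ KeysF par).card := Finset.card_pos.mpr ⟨ns, hmem⟩
  simp only [List.length_cons, List.length_nil]
  omega

theorem mu_le_of_subkeys (par par' : Std.HashMap (List Int) (Option (List Int)))
    (hsub : ∀ k, k ∈ par → k ∈ par') :
    (WFS \ KeysF par').card ≤ (WFS \ KeysF par).card := by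
  apply Finset.card_le_card
  apply Finset.sdiff_subset_sdiff (Finset.Subset.refl _)
  intro k hk
  rw [mem_KeysF] at hk ⊢
  exact hsub k hk

theorem validW_concat (st : List Int) (c : Int) (hst : ValidW st) (hc : c ∉ st)
    (h0 : 0 ≤ c) (h8 : c < 8) : ValidW (st ++ [c]) := by
  constructor
  · have hcns : (c :: st).Nodup := List.nodup_cons.mpr ⟨hc, hst.1⟩
    exact (List.perm_append_singleton c st).symm.nodup hcns
  · intro x hx
    rcases List.mem_append.mp hx with hx | hx
    · exact hst.2 x hx
    · have : x = c := by simpa using hx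
      subst this
      exact ⟨h0, h8⟩

-- the one big characterization of the inner loop
theorem bfsInner_spec (tgt st : List Int) (hst : ValidW st) (_hlen : st.length < 8) :
    ∀ (cs : List Int) (q : List (List Int) × List (List Int))
      (par : Std.HashMap (List Int) (Option (List Int))),
      (∀ c ∈ cs, 0 ≤ c ∧ c < 8) → InvP par → st ∈ par → (∀ s ∈ QL q, s ∈ par) →
      (∀ k, k ∈ par → k ∈ (bfsInner tgt st cs q par).2.1) ∧
      (∀ k, k ∈ par → (bfsInner tgt st cs q par).2.1[k]? = par[k]?) ∧
      InvP (bfsInner tgt st cs q par).2.1 ∧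
      (∀ s ∈ QL (bfsInner tgt st cs q par).1, s ∈ (bfsInner tgt st cs q par).2.1) ∧
      ((bfsInner tgt st cs q par).2.2 = false →
        ∀ c ∈ cs, c ∉ st → st ++ [c] ∈ (bfsInner tgt st cs q par).2.1) ∧
      ((bfsInner tgt st cs q par).2.2 = true → tgt ∈ (bfsInner tgt st cs q par).2.1) ∧
      ((bfsInner tgt st cs q par).2.2 = false →
        ∀ s ∈ QL q, s ∈ QL (bfsInner tgt st cs q par).1) ∧
      ((bfsInner tgt st cs q par).2.2 = false →
        ∀ k, k ∈ (bfsInner tgt st cs q par).2.1 → k ∉ par →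
          k ∈ QL (bfsInner tgt st cs q par).1) ∧
      mu (bfsInner tgt st cs q par).1 (bfsInner tgt st cs q par).2.1 ≤ mu q par := by
  intro cs
  induction cs with
  | nil =>
    intro q par _ hP hstp hQ
    refine ⟨fun k hk => hk, fun k _ => rfl, hP, hQ, ?_, ?_, ?_, ?_, le_refl _⟩
    · intro _ c hc
      exact absurd hc (List.not_mem_nil)
    · intro hfd
      simp [bfsInner] at hfd
    · intro _ s hs
      exact hs
    · intro _ k hk hk'
      exact absurd hk hk'
  | cons c cs ih =>
    intro q par hcs hP hstp hQ
    have hcb := hcs c List.mem_cons_self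
    have hcs' : ∀ x ∈ cs, 0 ≤ x ∧ x < 8 := fun x hx => hcs x (List.mem_cons_of_mem c hx)
    by_cases hc : st.contains c
    · simp only [bfsInner, if_pos hc]
      obtain ⟨j1, j2, j3, j4, j5, j6, j7, j8, j9⟩ := ih q par hcs' hP hstp hQ
      refine ⟨j1, j2, j3, j4, ?_, j6, j7, j8, j9⟩
      intro hfd c' hc' hcn
      rcases List.mem_cons.mp hc' with rfl | hc'
      · exact absurd (by simpa using hc) hcn
      · exact j5 hfd c' hc' hcn
    · simp only [bfsInner, if_neg hc]
      by_cases hmem : (st ++ [c]) ∈ par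
      · rw [if_pos (Std.HashMap.contains_iff_mem.mpr hmem)]
        obtain ⟨j1, j2, j3, j4, j5, j6, j7, j8, j9⟩ := ih q par hcs' hP hstp hQ
        refine ⟨j1, j2, j3, j4, ?_, j6, j7, j8, j9⟩
        intro hfd c' hc' hcn
        rcases List.mem_cons.mp hc' with rfl | hc'
        · exact j1 _ hmem
        · exact j5 hfd c' hc' hcn
      · have hncont : ¬ (par.contains (st ++ [c]) = true) := by
          rw [Std.HashMap.contains_iff_mem]
          exact hmem
        rw [if_neg hncont]
        have hcnotin : c ∉ st := by simpa using hc
        have hnsv : ValidW (st ++ [c]) := validW_concat st c hst hcnotin hcb.1 hcb.2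
        have hnsW : st ++ [c] ∈ WFS := mem_WFS _ hnsv
        have hnsne : st ++ [c] ≠ [] := by simp
        have hgetins : ∀ k, k ∈ par →
            (par.insert (st ++ [c]) (some st))[k]? = par[k]? := by
          intro k hk
          rw [Std.HashMap.getElem?_insert]
          rw [if_neg]
          simp only [beq_iff_eq]
          intro he
          exact hmem (he ▸ hk)
        have hPins : InvP (par.insert (st ++ [c]) (some st)) := by
          refine ⟨?_, ?_, ?_, ?_⟩
          · intro k hk
            rcases Std.HashMap.mem_insert.mp hk with hk | hk
            · have : st ++ [c] = k := by simpa using hk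
              subst this
              exact hnsv
            · exact hP.1 k hk
          · exact Std.HashMap.mem_insert.mpr (Or.inr hP.2.1)
          · intro k hk
            rcases Std.HashMap.mem_insert.mp hk with hk' | hk'
            · have : st ++ [c] = k := by simpa using hk'
              subst this
              rw [Std.HashMap.getElem?_insert_self, if_neg hnsne, List.dropLast_concat]
            · rw [hgetins k hk']
              exact hP.2.2.1 k hk'
          · intro k hk hne
            rcases Std.HashMap.mem_insert.mp hk with hk' | hk'
            · have : st ++ [c] = k := by simpa using hk'
              subst this
              rw [List.dropLast_concat]
              exact Std.HashMap.mem_insert.mpr (Or.inr hstp)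
            · exact Std.HashMap.mem_insert.mpr (Or.inr (hP.2.2.2 k hk' hne))
        by_cases het : st ++ [c] = tgt
        · rw [if_pos het]
          refine ⟨?_, ?_, hPins, ?_, ?_, ?_, ?_, ?_, ?_⟩
          · intro k hk
            exact Std.HashMap.mem_insert.mpr (Or.inr hk)
          · intro k hk
            exact hgetins k hk
          · intro s hs
            simp [QL] at hs
          · intro hfd
            simp at hfd
          · intro _
            rw [← het]
            exact Std.HashMap.mem_insert_self
          · intro hfd
            simp at hfd
          · intro hfd
            simp at hfd
          · show mu ([], []) (par.insert (st ++ [c]) (some st)) ≤ mu q par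
            unfold mu
            have h1 := mu_le_of_subkeys par (par.insert (st ++ [c]) (some st))
              (fun k hk => Std.HashMap.mem_insert.mpr (Or.inr hk))
            simp only [QL, List.append_nil, List.reverse_nil, List.length_nil]
            omega
        · rw [if_neg het]
          have hQ' : ∀ s ∈ QL (pvQPush q (st ++ [c])), s ∈ par.insert (st ++ [c]) (some st) := by
            intro s hs
            rw [QL_push] at hs
            rcases List.mem_append.mp hs with hs | hs
            · exact Std.HashMap.mem_insert.mpr (Or.inr (hQ s hs))
            · have : s = st ++ [c] := by simpa using hs
              subst this
              exact Std.HashMap.mem_insert_self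
          obtain ⟨j1, j2, j3, j4, j5, j6, j7, j8, j9⟩ := ih (pvQPush q (st ++ [c]))
            (par.insert (st ++ [c]) (some st)) hcs' hPins
            (Std.HashMap.mem_insert.mpr (Or.inr hstp)) hQ'
          have hmu_eq := mu_insert q par (st ++ [c]) (some st) hmem hnsW
          refine ⟨?_, ?_, j3, j4, ?_, j6, ?_, ?_, ?_⟩
          · intro k hk
            exact j1 k (Std.HashMap.mem_insert.mpr (Or.inr hk))
          · intro k hk
            rw [j2 k (Std.HashMap.mem_insert.mpr (Or.inr hk)), hgetins k hk]
          · intro hfd c' hc' hcn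
            rcases List.mem_cons.mp hc' with rfl | hc'
            · exact j1 _ Std.HashMap.mem_insert_self
            · exact j5 hfd c' hc' hcn
          · intro hfd s hs
            exact j7 hfd s (by rw [QL_push]; exact List.mem_append_left _ hs)
          · intro hfd k hk hknp
            by_cases hk' : k ∈ par.insert (st ++ [c]) (some st)
            · have : k = st ++ [c] := by
                rcases Std.HashMap.mem_insert.mp hk' with h | h
                · have h2 : st ++ [c] = k := by simpa using h
                  exact h2.symm
                · exact absurd h hknp
              subst this
              exact j7 hfd _ (by rw [QL_push]; exact List.mem_append_right _ (by simp))
            · exact j8 hfd k hk hk'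
          · omega

theorem all_expanded_complete (par : Std.HashMap (List Int) (Option (List Int)))
    (hnil : [] ∈ par) (hall : ∀ w, w ∈ par → w.length < 8 → Expanded par w)
    (tgt : List Int) (hv : ValidW tgt) : tgt ∈ par := by
  suffices h : ∀ w, ValidW w → w ∈ par from h tgt hv
  intro w
  induction w using List.reverseRecOn with
  | nil => intro _; exact hnil
  | append_singleton w c ih =>
    intro hw
    have hwn : w.Nodup := ((List.sublist_append_left w [c]).nodup hw.1)
    have hwv : ValidW w := ⟨hwn, fun x hx => hw.2 x (List.mem_append_left _ hx)⟩
    have hwp := ih hwv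
    have hlen := validW_length_le _ hw
    have hlt : w.length < 8 := by
      simp only [List.length_append, List.length_cons, List.length_nil] at hlen
      omega
    have hc : c ∉ w := by
      have hp : (w ++ [c]).Perm (c :: w) := (List.perm_append_singleton c w)
      have hnd := hp.nodup hw.1
      exact (List.nodup_cons.mp hnd).1
    have hcb := hw.2 c (List.mem_append_right _ (List.mem_singleton_self c))
    exact hall w hwp hlt c hcb.1 hcb.2 hc

theorem bfsLoop_spec (tgt : List Int) :
    ∀ (fuel : Nat) (q : List (List Int) × List (List Int))
      (par : Std.HashMap (List Int) (Option (List Int))),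
      InvP par → (∀ s ∈ QL q, s ∈ par) →
      InvP (bfsLoop tgt fuel q par) ∧
      (∀ k, k ∈ par → k ∈ bfsLoop tgt fuel q par) ∧
      (ValidW tgt → Comp tgt q par → mu q par < fuel → tgt ∈ bfsLoop tgt fuel q par) := by
  intro fuel
  induction fuel with
  | zero =>
    intro q par hP hQ
    refine ⟨hP, fun k hk => hk, ?_⟩
    intro _ _ hmu
    omega
  | succ fuel ih =>
    intro q par hP hQ
    cases hpop : pvQPop q with
    | none =>
      have hred : bfsLoop tgt (fuel + 1) q par = par := by
        simp [bfsLoop, hpop]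
      rw [hred]
      refine ⟨hP, fun k hk => hk, ?_⟩
      intro hv hc _
      rcases hc with h | h
      · exact h
      · apply all_expanded_complete par hP.2.1 _ tgt hv
        intro w hw hl
        rcases h w hw hl with hq | he
        · rw [QL_pop_none q hpop] at hq
          exact absurd hq (List.not_mem_nil)
        · exact he
    | some p =>
      obtain ⟨st, q'⟩ := p
      have hqq : QL q = st :: QL q' := QL_pop q st q' hpop
      have hstp : st ∈ par := hQ st (by rw [hqq]; exact List.mem_cons_self)
      have hQ' : ∀ s ∈ QL q', s ∈ par := fun s hs =>
        hQ s (by rw [hqq]; exact List.mem_cons_of_mem _ hs)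
      have hmuq : mu q par = mu q' par + 1 := by
        unfold mu
        rw [hqq, List.length_cons]
        omega
      by_cases h8 : st.length = 8
      · by_cases het : st = tgt
        · have hred : bfsLoop tgt (fuel + 1) q par = par := by
            simp only [bfsLoop, hpop]
            rw [if_pos h8, if_pos het]
          rw [hred]
          exact ⟨hP, fun k hk => hk, fun _ _ _ => het ▸ hstp⟩
        · have hred : bfsLoop tgt (fuel + 1) q par = bfsLoop tgt fuel q' par := by
            simp only [bfsLoop, hpop]
            rw [if_pos h8, if_neg het]
          rw [hred]
          obtain ⟨iP, imono, icomp⟩ := ih q' par hP hQ'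
          refine ⟨iP, imono, ?_⟩
          intro hv hc hmu
          apply icomp hv ?_ (by omega)
          rcases hc with h | h
          · exact Or.inl h
          · right
            intro w hw hl
            rcases h w hw hl with hq | he
            · rw [hqq] at hq
              rcases List.mem_cons.mp hq with rfl | hq
              · exact absurd h8 (by omega)
              · exact Or.inl hq
            · exact Or.inr he
      · have hlt8 : st.length < 8 :=
          lt_of_le_of_ne (validW_length_le st (hP.1 st hstp)) h8
        have hcs : ∀ c ∈ PySem.List.pyRange 0 8 1, 0 ≤ c ∧ c < 8 := by
          intro c hcm
          exact (PySem.List.mem_pyRange_one).mp hcm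
        obtain ⟨j1, j2, j3, j4, j5, j6, j7, j8, j9⟩ :=
          bfsInner_spec tgt st (hP.1 st hstp) hlt8 (PySem.List.pyRange 0 8 1) q' par hcs hP hstp hQ'
        have hred : bfsLoop tgt (fuel + 1) q par
            = bfsLoop tgt fuel (bfsInner tgt st (PySem.List.pyRange 0 8 1) q' par).1
                (bfsInner tgt st (PySem.List.pyRange 0 8 1) q' par).2.1 := by
          simp only [bfsLoop, hpop]
          rw [if_neg h8]
        rw [hred]
        obtain ⟨kP, kmono, kcomp⟩ := ih _ _ j3 j4
        refine ⟨kP, fun k hk => kmono k (j1 k hk), ?_⟩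
        intro hv hc hmu
        cases hfd : (bfsInner tgt st (PySem.List.pyRange 0 8 1) q' par).2.2 with
        | true => exact kmono tgt (j6 hfd)
        | false =>
          apply kcomp hv ?_ ?_
          · rcases hc with h | h
            · exact Or.inl (j1 tgt h)
            · right
              intro w hw hl
              by_cases hwold : w ∈ par
              · rcases h w hwold hl with hq | he
                · rw [hqq] at hq
                  rcases List.mem_cons.mp hq with rfl | hq
                  · right
                    intro c h0 hc7 hcw
                    exact j5 hfd c (PySem.List.mem_pyRange_one.mpr ⟨h0, hc7⟩) hcw
                  · exact Or.inl (j7 hfd w hq)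
                · right
                  intro c h0 hc7 hcw
                  exact j1 _ (he c h0 hc7 hcw)
              · exact Or.inl (j8 hfd w hw hwold)
          · have hj9 := j9
            omega

theorem foldl_enum_set (cur : List Int) :
    ∀ (k : Nat) (s : List (Option Int)), cur.length + k ≤ s.length →
    (PySem.List.enumerate cur (k : Int)).foldl (fun a iv => a.set iv.1.toNat (some iv.2)) s
      = s.take k ++ cur.map some ++ s.drop (k + cur.length) := by
  induction cur with
  | nil =>
    intro k s h
    simp only [PySem.List.enumerate_nil, List.foldl_nil, List.map_nil, List.length_nil,
      Nat.add_zero, List.append_nil]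
    exact (List.take_append_drop k s).symm
  | cons x xs ih =>
    intro k s h
    simp only [List.length_cons] at h
    rw [PySem.List.enumerate_cons]
    simp only [List.foldl_cons, Int.toNat_natCast]
    have hcast : (k : Int) + 1 = ((k + 1 : Nat) : Int) := by push_cast; ring
    rw [hcast, ih (k + 1) (s.set k (some x)) (by rw [List.length_set]; omega)]
    have hklt : k < s.length := by omega
    have htake : (s.set k (some x)).take (k + 1) = s.take k ++ [some x] := by
      rw [List.take_succ_eq_append_getElem (by rw [List.length_set]; omega)]
      rw [List.take_set, List.getElem_set_self]
      congr 1
      apply List.set_eq_of_length_le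
      rw [List.length_take]
      omega
    have hdrop : (s.set k (some x)).drop (k + 1 + xs.length) = s.drop (k + 1 + xs.length) := by
      rw [List.drop_set, if_pos (by omega)]
    rw [htake, hdrop]
    simp only [List.map_cons]
    have : k + (x :: xs).length = k + 1 + xs.length := by simp; omega
    rw [List.length_cons]
    have harr : k + (xs.length + 1) = k + 1 + xs.length := by omega
    rw [harr]
    simp [List.append_assoc]

theorem padRow_eq (cur : List Int) (h : cur.length ≤ 8) :
    padRow cur = cur.map some ++ List.replicate (8 - cur.length) none := by
  unfold padRow
  have h0 : ((0 : Int)) = ((0 : Nat) : Int) := rfl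
  rw [h0, foldl_enum_set cur 0 (List.replicate 8 none) (by simp; omega)]
  simp only [List.take_zero, List.nil_append, Nat.zero_add, List.drop_replicate]

def chainList (w : List Int) : List (List (Option Int)) :=
  (List.range (w.length + 1)).reverse.map (fun i => padRow (w.take i))

theorem chainList_concat (w : List Int) (c : Int) :
    chainList (w ++ [c]) = padRow (w ++ [c]) :: chainList w := by
  unfold chainList
  have hl : (w ++ [c]).length = w.length + 1 := by simp
  rw [hl, List.range_succ, List.reverse_append]
  simp only [List.reverse_cons, List.reverse_nil, List.nil_append, List.map_cons,
    List.singleton_append, List.map_cons]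
  congr 1
  · rw [List.take_of_length_le (by simp)]
  · apply List.map_congr_left
    intro i hi
    rw [List.mem_reverse, List.mem_range] at hi
    rw [List.take_append_of_le_length (by omega)]

theorem rebuild_step (fuel : Nat) (par : Std.HashMap (List Int) (Option (List Int)))
    (w : List Int) (path : List (List (Option Int))) :
    rebuild (fuel + 1) par (some w) path = rebuild fuel par (par[w]?).join (path ++ [padRow w]) :=
  rfl

theorem rebuild_chain (par : Std.HashMap (List Int) (Option (List Int))) (hP : InvP par) :
    ∀ w, w ∈ par → ∀ acc, rebuild (w.length + 1) par (some w) acc = acc ++ chainList w := by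
  intro w
  induction w using List.reverseRecOn with
  | nil =>
    intro hw acc
    show rebuild 1 par (some []) acc = acc ++ chainList []
    have hget : par[([] : List Int)]? = some none := by
      have := hP.2.2.1 [] hP.2.1
      simpa using this
    rw [rebuild_step]
    have hjoin : (par[([] : List Int)]?).join = none := by rw [hget]; rfl
    rw [hjoin]
    show acc ++ [padRow []] = acc ++ chainList []
    rfl
  | append_singleton w c ih =>
    intro hw acc
    have hne : w ++ [c] ≠ [] := by simp
    have hget : par[(w ++ [c])]? = some (some w) := by
      have := hP.2.2.1 (w ++ [c]) hw
      rw [if_neg hne] at this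
      simpa [List.dropLast_concat] using this
    have hwp : w ∈ par := by
      have := hP.2.2.2 (w ++ [c]) hw hne
      simpa [List.dropLast_concat] using this
    have hl : (w ++ [c]).length = w.length + 1 := by simp
    rw [hl]
    show rebuild (w.length + 1 + 1) par (some (w ++ [c])) acc = acc ++ chainList (w ++ [c])
    have hjoin : (par[(w ++ [c])]?).join = some w := by rw [hget]; rfl
    rw [rebuild_step, hjoin]
    rw [ih hwp (acc ++ [padRow (w ++ [c])]), chainList_concat]
    simp [List.append_assoc]

theorem par0_invP :
    InvP (Std.HashMap.emptyWithCapacity.insert ([] : List Int) (none : Option (List Int))) := by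
  refine ⟨?_, ?_, ?_, ?_⟩
  · intro k hk
    rw [Std.HashMap.mem_insert] at hk
    rcases hk with hk | hk
    · have : k = [] := by simpa using hk.symm
      subst this
      exact ⟨List.nodup_nil, by simp⟩
    · exact absurd hk (Std.HashMap.not_mem_emptyWithCapacity)
  · exact Std.HashMap.mem_insert_self
  · intro k hk
    rw [Std.HashMap.mem_insert] at hk
    rcases hk with hk | hk
    · have : k = [] := by simpa using hk.symm
      subst this
      simp
    · exact absurd hk (Std.HashMap.not_mem_emptyWithCapacity)
  · intro k hk hne
    rw [Std.HashMap.mem_insert] at hk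
    rcases hk with hk | hk
    · have : k = [] := by simpa using hk.symm
      exact absurd this hne
    · exact absurd hk (Std.HashMap.not_mem_emptyWithCapacity)

theorem mem_par0 (k : List Int)
    (hk : k ∈ Std.HashMap.emptyWithCapacity.insert ([] : List Int)
      (none : Option (List Int))) : k = [] := by
  rw [Std.HashMap.mem_insert] at hk
  rcases hk with hk | hk
  · simpa using hk.symm
  · exact absurd hk (Std.HashMap.not_mem_emptyWithCapacity)

theorem char_A_valid (tg : List Int) (h : ValidW tg) :
    bfs_target tg = (List.range (tg.length + 1)).map
      (fun i => (tg.take i).map some ++ List.replicate (8 - i) none) := by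
  unfold bfs_target
  obtain ⟨fP, fmono, fcomp⟩ := bfsLoop_spec tg 20000000 ([[]], [])
    (Std.HashMap.emptyWithCapacity.insert [] none) par0_invP
    (by
      intro s hs
      have : s = [] := by simpa [QL] using hs
      subst this
      exact Std.HashMap.mem_insert_self)
  have hcomp : Comp tg ([[]], []) (Std.HashMap.emptyWithCapacity.insert [] none) := by
    right
    intro w hw _
    left
    rw [mem_par0 w hw]
    simp [QL]
  have hmu : mu ([[]], []) (Std.HashMap.emptyWithCapacity.insert [] none) < 20000000 := by
    unfold mu
    have h1 : (WFS \ KeysF (Std.HashMap.emptyWithCapacity.insert ([] : List Int) none)).card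
        ≤ WFS.card := Finset.card_le_card (Finset.sdiff_subset)
    have h2 := WFS_card_le
    simp only [QL, List.reverse_nil, List.append_nil, List.length_cons, List.length_nil]
    omega
  have htg := fcomp h hcomp hmu
  rw [if_pos (Std.HashMap.contains_iff_mem.mpr htg)]
  rw [rebuild_chain _ fP tg htg []]
  simp only [List.nil_append]
  unfold chainList
  rw [← List.map_reverse, List.reverse_reverse]
  apply List.map_congr_left
  intro i hi
  rw [List.mem_range] at hi
  have hti : (tg.take i).length = i := by
    rw [List.length_take]
    omega
  rw [padRow_eq _ (by rw [hti]; have := validW_length_le tg h; omega), hti]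

theorem char_A_invalid (tg : List Int) (h : ¬ ValidW tg) : bfs_target tg = [] := by
  unfold bfs_target
  obtain ⟨fP, _, _⟩ := bfsLoop_spec tg 20000000 ([[]], [])
    (Std.HashMap.emptyWithCapacity.insert [] none) par0_invP
    (by
      intro s hs
      have : s = [] := by simpa [QL] using hs
      subst this
      exact Std.HashMap.mem_insert_self)
  rw [if_neg]
  simp only [Std.HashMap.contains_iff_mem]
  intro hmem
  exact h (fP.1 tg hmem)

theorem ofList_len_lt (xs : List Int) (h : ¬ xs.Nodup) :
    (PySem.Set.ofList xs).length < xs.length := by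
  induction xs with
  | nil => simp at h
  | cons x xs ih =>
    rw [PySem.Set.ofList_cons]
    by_cases hx : x ∈ xs
    · have hsub : ∀ y ∈ PySem.Set.discard (PySem.Set.ofList xs) x, y ∈ xs.erase x := by
        intro y hy
        rw [PySem.Set.mem_discard] at hy
        have hy1 : y ∈ xs := by
          have := hy.1
          rwa [PySem.Set.mem_ofList] at this
        exact (List.mem_erase_of_ne hy.2).mpr hy1
      have hnd : (PySem.Set.discard (PySem.Set.ofList xs) x).Nodup :=
        PySem.Set.nodup_discard _ _ (PySem.Set.nodup_ofList xs)
      have hle := nodup_subset_length _ _ hnd hsub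
      have herl : (xs.erase x).length = xs.length - 1 := List.length_erase_of_mem hx
      have hlen : 1 ≤ xs.length := List.length_pos_of_mem hx
      simp only [List.length_cons]
      omega
    · have hnd' : ¬ xs.Nodup := by
        intro hc
        exact h (List.nodup_cons.mpr ⟨hx, hc⟩)
      have hlt := ih hnd'
      have hsub : ∀ y ∈ PySem.Set.discard (PySem.Set.ofList xs) x, y ∈ PySem.Set.ofList xs := by
        intro y hy
        rw [PySem.Set.mem_discard] at hy
        exact hy.1
      have hnd : (PySem.Set.discard (PySem.Set.ofList xs) x).Nodup :=
        PySem.Set.nodup_discard _ _ (PySem.Set.nodup_ofList xs)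
      have hle := nodup_subset_length _ _ hnd hsub
      simp only [List.length_cons]
      omega

theorem ofList_len_eq_iff (xs : List Int) :
    (PySem.Set.ofList xs).length = xs.length ↔ xs.Nodup := by
  constructor
  · intro h
    by_contra hnd
    have := ofList_len_lt xs hnd
    omega
  · intro h
    rw [PySem.Set.ofList_eq_self_of_nodup xs h]

theorem char_B_valid (tg : List Int) (h : ValidW tg) :
    bfs_target_alt tg = (List.range (tg.length + 1)).map
      (fun i => (tg.take i).map some ++ List.replicate (8 - i) none) := by
  unfold bfs_target_alt
  have hg : ¬ ((PySem.Set.ofList tg).length ≠ tg.length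
      ∨ tg.any (fun v => decide (v < 0) || decide (8 ≤ v)) = true) := by
    rintro (h1 | h2)
    · exact h1 ((ofList_len_eq_iff tg).mpr h.1)
    · rw [List.any_eq_true] at h2
      obtain ⟨v, hv, hb⟩ := h2
      have := h.2 v hv
      simp only [Bool.or_eq_true, decide_eq_true_eq] at hb
      omega
  rw [if_neg hg]

theorem char_B_invalid (tg : List Int) (h : ¬ ValidW tg) : bfs_target_alt tg = [] := by
  unfold bfs_target_alt
  rw [if_pos]
  unfold ValidW at h
  rcases not_and_or.mp h with h1 | h2
  · left
    intro he
    exact h1 ((ofList_len_eq_iff tg).mp he)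
  · right
    push Not at h2
    obtain ⟨v, hv, hb⟩ := h2
    simp only [List.any_eq_true]
    refine ⟨v, hv, ?_⟩
    simp only [Bool.or_eq_true, decide_eq_true_eq]
    omega

-- ===== VERDICT (by name: the statement is the Claim_ definition above) =====
theorem bfs_target_spec : Claim_equal_bfs_target := by
  intro tg _
  unfold Spec_bfs_target
  by_cases h : ValidW tg
  · rw [char_A_valid tg h, char_B_valid tg h]
  · rw [char_A_invalid tg h, char_B_invalid tg h]
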